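-- pv_equiv track=rewrite | github.com/thanikantisiva/aws-honesteats | scripts/snow_drops_expand_menu_sheet.py | _build_addon_pools
-- ===== SOURCE A (Python) =====
-- def _build_addon_pools(
--     rows: list[tuple[str, str, str, int]],
-- ) -> dict[str, list[tuple[str, int]]]:
--     """Collect (name, price) from non-combo menu rows by pool key."""
--     pools: dict[str, list[tuple[str, int]]] = {
--         "veg_burger": [],
--         "chicken_burger": [],
--         "veg_sandwich": [],
--         "chicken_sandwich": [],
--         "veg_pizza": [],
--         "chicken_pizza": [],
--     }
--     for cat, sub, name, price in rows:
--         if cat == "Combos":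
--             continue
--         if cat == "Burgers" and sub == "Veg Burgers":
--             pools["veg_burger"].append((name, price))
--         elif cat == "Burgers" and sub == "Chicken Burgers":
--             pools["chicken_burger"].append((name, price))
--         elif cat == "Sandwiches" and sub == "Veg Sandwiches":
--             pools["veg_sandwich"].append((name, price))
--         elif cat == "Sandwiches" and sub == "Chicken Sandwiches":
--             pools["chicken_sandwich"].append((name, price))
--         elif cat == "Pizza" and sub == "Veg Pizza":
--             pools["veg_pizza"].append((name, price))
--         elif cat == "Pizza" and sub == "Chicken Pizza":
--             pools["chicken_pizza"].append((name, price))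
--     return pools
-- ===== SOURCE B (Python) =====
-- _POOLS = [
--     ("veg_burger", "Burgers", "Veg Burgers"),
--     ("chicken_burger", "Burgers", "Chicken Burgers"),
--     ("veg_sandwich", "Sandwiches", "Veg Sandwiches"),
--     ("chicken_sandwich", "Sandwiches", "Chicken Sandwiches"),
--     ("veg_pizza", "Pizza", "Veg Pizza"),
--     ("chicken_pizza", "Pizza", "Chicken Pizza"),
-- ]
--
--
-- def _build_addon_pools(
--     rows: list[tuple[str, str, str, int]],
-- ) -> dict[str, list[tuple[str, int]]]:
--     """Collect (name, price) from non-combo menu rows by pool key."""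
--     return {
--         key: [(name, price) for cat, sub, name, price in rows if (cat, sub) == (c, s)]
--         for key, c, s in _POOLS
--     }
-- ===== Notes on version B (the rewrite author's own statement) =====
-- stated objective: simpler
-- what changed: Replaces A's single mutating pass (per-row if/elif cascade appending into six pre-seeded pool lists) with a declarative dict comprehension that builds each pool independently by filtering rows for its (cat, sub) pair; no mutable pools, no per-row dispatch, Combos and unlisted pairs vanish because they match no pool's filter.
import Mathlib
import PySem

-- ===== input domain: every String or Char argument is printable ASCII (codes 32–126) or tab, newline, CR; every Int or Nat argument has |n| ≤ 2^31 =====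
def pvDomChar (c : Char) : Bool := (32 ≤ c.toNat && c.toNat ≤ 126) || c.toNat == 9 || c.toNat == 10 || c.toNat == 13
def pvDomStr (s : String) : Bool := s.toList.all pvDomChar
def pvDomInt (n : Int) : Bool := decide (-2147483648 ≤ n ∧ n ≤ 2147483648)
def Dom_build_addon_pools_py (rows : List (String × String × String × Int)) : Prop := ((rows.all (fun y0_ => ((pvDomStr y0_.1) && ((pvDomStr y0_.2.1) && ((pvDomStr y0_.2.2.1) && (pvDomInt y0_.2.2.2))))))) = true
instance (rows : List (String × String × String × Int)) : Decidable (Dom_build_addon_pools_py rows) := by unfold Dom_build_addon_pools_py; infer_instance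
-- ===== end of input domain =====

-- B replaces A's single mutating pass (if/elif cascade appending into six pre-seeded pools) by a
-- declarative comprehension building each pool independently as a filter of rows (objective: simpler).


-- ===== PORT A =====
-- literal port of A: six empty pools, then the if/elif cascade appending per row
def build_addon_pools_py (rows : List (String × String × String × Int)) : List (String × List (String × Int)) :=
  let init : PySem.Dict String (List (String × Int)) :=
    PySem.Dict.ofList
      [("veg_burger", []), ("chicken_burger", []), ("veg_sandwich", []),
       ("chicken_sandwich", []), ("veg_pizza", []), ("chicken_pizza", [])]
  let pools := rows.foldl (fun d r =>
    let (cat, sub, name, price) := r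
    if cat == "Combos" then d
    else if cat == "Burgers" && sub == "Veg Burgers" then
      d.modify "veg_burger" [] (· ++ [(name, price)])
    else if cat == "Burgers" && sub == "Chicken Burgers" then
      d.modify "chicken_burger" [] (· ++ [(name, price)])
    else if cat == "Sandwiches" && sub == "Veg Sandwiches" then
      d.modify "veg_sandwich" [] (· ++ [(name, price)])
    else if cat == "Sandwiches" && sub == "Chicken Sandwiches" then
      d.modify "chicken_sandwich" [] (· ++ [(name, price)])
    else if cat == "Pizza" && sub == "Veg Pizza" then
      d.modify "veg_pizza" [] (· ++ [(name, price)])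
    else if cat == "Pizza" && sub == "Chicken Pizza" then
      d.modify "chicken_pizza" [] (· ++ [(name, price)])
    else d) init
  pools.items

-- ===== PORT B =====
-- port of Source B's module constant _POOLS
def poolSpecs : List (String × String × String) :=
  [("veg_burger", "Burgers", "Veg Burgers"),
   ("chicken_burger", "Burgers", "Chicken Burgers"),
   ("veg_sandwich", "Sandwiches", "Veg Sandwiches"),
   ("chicken_sandwich", "Sandwiches", "Chicken Sandwiches"),
   ("veg_pizza", "Pizza", "Veg Pizza"),
   ("chicken_pizza", "Pizza", "Chicken Pizza")]

-- one filter comprehension: [(name, price) for cat, sub, name, price in rows if (cat, sub) == (c, s)]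
def poolFilter (c s : String) (rows : List (String × String × String × Int)) : List (String × Int) :=
  rows.filterMap (fun r =>
    if r.1 == c && r.2.1 == s then some (r.2.2.1, r.2.2.2) else none)

-- the dict comprehension over _POOLS
def build_addon_pools_py_alt (rows : List (String × String × String × Int)) : List (String × List (String × Int)) :=
  poolSpecs.map (fun t => (t.1, poolFilter t.2.1 t.2.2 rows))

-- ===== PRECONDITION & SPEC =====
def Spec_build_addon_pools_py (rows : List (String × String × String × Int)) (out : List (String × List (String × Int))) : Prop := out = build_addon_pools_py_alt rows
instance (rows : List (String × String × String × Int)) (out : List (String × List (String × Int))) : Decidable (Spec_build_addon_pools_py rows out) := by unfold Spec_build_addon_pools_py; infer_instance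

-- ===== CLAIM (what is proved, stated in full; the proofs are below) =====
def Claim_equal_build_addon_pools_py : Prop := ∀ (rows : List (String × String × String × Int)), Dom_build_addon_pools_py rows → Spec_build_addon_pools_py rows (build_addon_pools_py rows)

-- ===== LEMMAS AND PROOFS =====

-- A's loop body, named so the invariant lemma can speak about it (defeq to the lambda in the port)
def stepA (d : PySem.Dict String (List (String × Int)))
    (r : String × String × String × Int) : PySem.Dict String (List (String × Int)) :=
    let (cat, sub, name, price) := r
    if cat == "Combos" then d
    else if cat == "Burgers" && sub == "Veg Burgers" then
      d.modify "veg_burger" [] (· ++ [(name, price)])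
    else if cat == "Burgers" && sub == "Chicken Burgers" then
      d.modify "chicken_burger" [] (· ++ [(name, price)])
    else if cat == "Sandwiches" && sub == "Veg Sandwiches" then
      d.modify "veg_sandwich" [] (· ++ [(name, price)])
    else if cat == "Sandwiches" && sub == "Chicken Sandwiches" then
      d.modify "chicken_sandwich" [] (· ++ [(name, price)])
    else if cat == "Pizza" && sub == "Veg Pizza" then
      d.modify "veg_pizza" [] (· ++ [(name, price)])
    else if cat == "Pizza" && sub == "Chicken Pizza" then
      d.modify "chicken_pizza" [] (· ++ [(name, price)])
    else d

-- when no branch of A's cascade fires, the row is skipped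
theorem stepA_skip (d : PySem.Dict String (List (String × Int)))
    (cat sub name : String) (price : Int)
    (h1 : ¬ (cat = "Burgers" ∧ sub = "Veg Burgers"))
    (h2 : ¬ (cat = "Burgers" ∧ sub = "Chicken Burgers"))
    (h3 : ¬ (cat = "Sandwiches" ∧ sub = "Veg Sandwiches"))
    (h4 : ¬ (cat = "Sandwiches" ∧ sub = "Chicken Sandwiches"))
    (h5 : ¬ (cat = "Pizza" ∧ sub = "Veg Pizza"))
    (h6 : ¬ (cat = "Pizza" ∧ sub = "Chicken Pizza")) :
    stepA d (cat, sub, name, price) = d := by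
  show (if cat == "Combos" then d
    else if cat == "Burgers" && sub == "Veg Burgers" then
      d.modify "veg_burger" [] (· ++ [(name, price)])
    else if cat == "Burgers" && sub == "Chicken Burgers" then
      d.modify "chicken_burger" [] (· ++ [(name, price)])
    else if cat == "Sandwiches" && sub == "Veg Sandwiches" then
      d.modify "veg_sandwich" [] (· ++ [(name, price)])
    else if cat == "Sandwiches" && sub == "Chicken Sandwiches" then
      d.modify "chicken_sandwich" [] (· ++ [(name, price)])
    else if cat == "Pizza" && sub == "Veg Pizza" then
      d.modify "veg_pizza" [] (· ++ [(name, price)])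
    else if cat == "Pizza" && sub == "Chicken Pizza" then
      d.modify "chicken_pizza" [] (· ++ [(name, price)])
    else d) = d
  split_ifs with a1 a2 a3 a4 a5 a6 a7 <;>
    first
      | rfl
      | (exfalso; simp only [Bool.and_eq_true, beq_iff_eq] at *; tauto)

-- a row matching none of a pool's (cat, sub) pair is dropped by that pool's filter
theorem poolFilter_skip (c s cat sub name : String) (price : Int)
    (rows : List (String × String × String × Int)) (h : ¬ (cat = c ∧ sub = s)) :
    poolFilter c s ((cat, sub, name, price) :: rows) = poolFilter c s rows := by
  simp only [poolFilter, List.filterMap_cons]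
  have : (if cat == c && sub == s then some (name, price) else none)
      = (none : Option (String × Int)) := by
    simp only [ite_eq_right_iff, Bool.and_eq_true, beq_iff_eq]
    rintro ⟨rfl, rfl⟩; exact absurd ⟨rfl, rfl⟩ h
  rw [this]

-- invariant: folding A's step over rows appends each pool's filter of rows to its accumulator
theorem fold_items (rows : List (String × String × String × Int))
    (l1 l2 l3 l4 l5 l6 : List (String × Int)) :
    (rows.foldl stepA (PySem.Dict.mk [("veg_burger", l1), ("chicken_burger", l2), ("veg_sandwich", l3), ("chicken_sandwich", l4), ("veg_pizza", l5), ("chicken_pizza", l6)])).items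
    = [("veg_burger", l1 ++ poolFilter "Burgers" "Veg Burgers" rows),
       ("chicken_burger", l2 ++ poolFilter "Burgers" "Chicken Burgers" rows),
       ("veg_sandwich", l3 ++ poolFilter "Sandwiches" "Veg Sandwiches" rows),
       ("chicken_sandwich", l4 ++ poolFilter "Sandwiches" "Chicken Sandwiches" rows),
       ("veg_pizza", l5 ++ poolFilter "Pizza" "Veg Pizza" rows),
       ("chicken_pizza", l6 ++ poolFilter "Pizza" "Chicken Pizza" rows)] := by
  induction rows generalizing l1 l2 l3 l4 l5 l6 with
  | nil => simp [poolFilter]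
  | cons r rows ih =>
    obtain ⟨cat, sub, name, price⟩ := r
    by_cases h0 : cat = "Combos"
    · subst h0
      rw [show List.foldl stepA (PySem.Dict.mk [("veg_burger", l1), ("chicken_burger", l2), ("veg_sandwich", l3), ("chicken_sandwich", l4), ("veg_pizza", l5), ("chicken_pizza", l6)]) (("Combos", sub, name, price) :: rows)
          = List.foldl stepA (PySem.Dict.mk [("veg_burger", l1), ("chicken_burger", l2), ("veg_sandwich", l3), ("chicken_sandwich", l4), ("veg_pizza", l5), ("chicken_pizza", l6)]) rows from rfl, ih]
      rw [poolFilter_skip _ _ _ _ _ _ _ (by simp), poolFilter_skip _ _ _ _ _ _ _ (by simp),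
          poolFilter_skip _ _ _ _ _ _ _ (by simp), poolFilter_skip _ _ _ _ _ _ _ (by simp),
          poolFilter_skip _ _ _ _ _ _ _ (by simp), poolFilter_skip _ _ _ _ _ _ _ (by simp)]
    · by_cases h1 : cat = "Burgers" ∧ sub = "Veg Burgers"
      · obtain ⟨hc, hs⟩ := h1; subst hc; subst hs
        rw [show List.foldl stepA (PySem.Dict.mk [("veg_burger", l1), ("chicken_burger", l2), ("veg_sandwich", l3), ("chicken_sandwich", l4), ("veg_pizza", l5), ("chicken_pizza", l6)]) (("Burgers", "Veg Burgers", name, price) :: rows)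
            = List.foldl stepA (PySem.Dict.mk [("veg_burger", l1 ++ [(name, price)]), ("chicken_burger", l2), ("veg_sandwich", l3), ("chicken_sandwich", l4), ("veg_pizza", l5), ("chicken_pizza", l6)]) rows from rfl, ih]
        simp [poolFilter]
      · by_cases h2 : cat = "Burgers" ∧ sub = "Chicken Burgers"
        · obtain ⟨hc, hs⟩ := h2; subst hc; subst hs
          rw [show List.foldl stepA (PySem.Dict.mk [("veg_burger", l1), ("chicken_burger", l2), ("veg_sandwich", l3), ("chicken_sandwich", l4), ("veg_pizza", l5), ("chicken_pizza", l6)]) (("Burgers", "Chicken Burgers", name, price) :: rows)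
              = List.foldl stepA (PySem.Dict.mk [("veg_burger", l1), ("chicken_burger", l2 ++ [(name, price)]), ("veg_sandwich", l3), ("chicken_sandwich", l4), ("veg_pizza", l5), ("chicken_pizza", l6)]) rows from rfl, ih]
          simp [poolFilter]
        · by_cases h3 : cat = "Sandwiches" ∧ sub = "Veg Sandwiches"
          · obtain ⟨hc, hs⟩ := h3; subst hc; subst hs
            rw [show List.foldl stepA (PySem.Dict.mk [("veg_burger", l1), ("chicken_burger", l2), ("veg_sandwich", l3), ("chicken_sandwich", l4), ("veg_pizza", l5), ("chicken_pizza", l6)]) (("Sandwiches", "Veg Sandwiches", name, price) :: rows)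
                = List.foldl stepA (PySem.Dict.mk [("veg_burger", l1), ("chicken_burger", l2), ("veg_sandwich", l3 ++ [(name, price)]), ("chicken_sandwich", l4), ("veg_pizza", l5), ("chicken_pizza", l6)]) rows from rfl, ih]
            simp [poolFilter]
          · by_cases h4 : cat = "Sandwiches" ∧ sub = "Chicken Sandwiches"
            · obtain ⟨hc, hs⟩ := h4; subst hc; subst hs
              rw [show List.foldl stepA (PySem.Dict.mk [("veg_burger", l1), ("chicken_burger", l2), ("veg_sandwich", l3), ("chicken_sandwich", l4), ("veg_pizza", l5), ("chicken_pizza", l6)]) (("Sandwiches", "Chicken Sandwiches", name, price) :: rows)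
                  = List.foldl stepA (PySem.Dict.mk [("veg_burger", l1), ("chicken_burger", l2), ("veg_sandwich", l3), ("chicken_sandwich", l4 ++ [(name, price)]), ("veg_pizza", l5), ("chicken_pizza", l6)]) rows from rfl, ih]
              simp [poolFilter]
            · by_cases h5 : cat = "Pizza" ∧ sub = "Veg Pizza"
              · obtain ⟨hc, hs⟩ := h5; subst hc; subst hs
                rw [show List.foldl stepA (PySem.Dict.mk [("veg_burger", l1), ("chicken_burger", l2), ("veg_sandwich", l3), ("chicken_sandwich", l4), ("veg_pizza", l5), ("chicken_pizza", l6)]) (("Pizza", "Veg Pizza", name, price) :: rows)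
                    = List.foldl stepA (PySem.Dict.mk [("veg_burger", l1), ("chicken_burger", l2), ("veg_sandwich", l3), ("chicken_sandwich", l4), ("veg_pizza", l5 ++ [(name, price)]), ("chicken_pizza", l6)]) rows from rfl, ih]
                simp [poolFilter]
              · by_cases h6 : cat = "Pizza" ∧ sub = "Chicken Pizza"
                · obtain ⟨hc, hs⟩ := h6; subst hc; subst hs
                  rw [show List.foldl stepA (PySem.Dict.mk [("veg_burger", l1), ("chicken_burger", l2), ("veg_sandwich", l3), ("chicken_sandwich", l4), ("veg_pizza", l5), ("chicken_pizza", l6)]) (("Pizza", "Chicken Pizza", name, price) :: rows)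
                      = List.foldl stepA (PySem.Dict.mk [("veg_burger", l1), ("chicken_burger", l2), ("veg_sandwich", l3), ("chicken_sandwich", l4), ("veg_pizza", l5), ("chicken_pizza", l6 ++ [(name, price)])]) rows from rfl, ih]
                  simp [poolFilter]
                · -- no branch fires
                  rw [List.foldl_cons, stepA_skip _ _ _ _ _ h1 h2 h3 h4 h5 h6, ih,
                      poolFilter_skip _ _ _ _ _ _ _ h1, poolFilter_skip _ _ _ _ _ _ _ h2,
                      poolFilter_skip _ _ _ _ _ _ _ h3, poolFilter_skip _ _ _ _ _ _ _ h4,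
                      poolFilter_skip _ _ _ _ _ _ _ h5, poolFilter_skip _ _ _ _ _ _ _ h6]

-- ===== VERDICT (by name: the statement is the Claim_ definition above) =====
theorem build_addon_pools_py_spec : Claim_equal_build_addon_pools_py := by
  intro rows _
  unfold Spec_build_addon_pools_py
  show (List.foldl stepA (PySem.Dict.mk [("veg_burger", []), ("chicken_burger", []), ("veg_sandwich", []), ("chicken_sandwich", []), ("veg_pizza", []), ("chicken_pizza", [])]) rows).items
      = build_addon_pools_py_alt rows
  rw [fold_items]
  simp [build_addon_pools_py_alt, poolSpecs]
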